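-- pv_equiv track=rewrite | github.com/andreabeschi/pubmed_word2vec | skipgram_training.py | get_num_samples
-- ===== SOURCE A (Python) =====
-- def get_num_samples(testo, window_size):
--     lunghezza = len(testo)
--     somma=0
--     if lunghezza < window_size:
--         somma = lunghezza * (lunghezza -1)
--         return somma
--     else:
--         for i in range(window_size):
--             somma = somma + (2*((2*window_size) - (i+1)))
--         somma= somma + (lunghezza - 2*window_size)*2*window_size
--     return somma
-- ===== SOURCE B (Python) =====
-- def get_num_samples(testo, window_size):
--     lunghezza = len(testo)
--     if lunghezza < window_size:
--         return lunghezza * (lunghezza - 1)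
--     return window_size * (2 * lunghezza - window_size - 1)
-- ===== Notes on version B (the rewrite author's own statement) =====
-- stated objective: faster
-- what changed: replaces the O(window_size) loop summing the arithmetic series with the closed form window_size*(2*len-window_size-1)
-- outside the precondition, e.g. on get_num_samples([1, 2, 3], -2): A returns -28, B returns -14
import Mathlib
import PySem

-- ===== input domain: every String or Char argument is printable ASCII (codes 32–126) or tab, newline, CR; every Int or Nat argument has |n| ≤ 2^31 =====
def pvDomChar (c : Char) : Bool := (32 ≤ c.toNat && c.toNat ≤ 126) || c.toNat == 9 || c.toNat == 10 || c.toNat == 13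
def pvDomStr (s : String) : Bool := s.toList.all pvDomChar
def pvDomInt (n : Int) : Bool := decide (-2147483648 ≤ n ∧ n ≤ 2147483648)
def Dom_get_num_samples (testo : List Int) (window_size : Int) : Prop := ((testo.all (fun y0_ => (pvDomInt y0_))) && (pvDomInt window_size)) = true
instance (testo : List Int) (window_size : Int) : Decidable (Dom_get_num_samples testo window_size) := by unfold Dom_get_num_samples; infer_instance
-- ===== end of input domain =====

-- B replaces A's O(window_size) summation loop with the closed form
-- window_size*(2*len-window_size-1); equal on all nonnegative window sizes.

-- ===== PORT A =====
def get_num_samples (testo : List Int) (window_size : Int) : Int :=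
  let lunghezza : Int := testo.length
  let somma : Int := 0
  if lunghezza < window_size then
    lunghezza * (lunghezza - 1)
  else
    let somma := (PySem.List.pyRange 0 window_size 1).foldl
      (fun s i => s + (2*((2*window_size) - (i+1)))) somma
    somma + (lunghezza - 2*window_size)*2*window_size

-- ===== PORT B =====
def get_num_samples_alt (testo : List Int) (window_size : Int) : Int :=
  let lunghezza : Int := testo.length
  if lunghezza < window_size then
    lunghezza * (lunghezza - 1)
  else
    window_size * (2 * lunghezza - window_size - 1)

-- ===== PRECONDITION & SPEC =====
-- Pre_ restricts to the natural domain of a sample count: a nonnegative window.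
-- It excludes negative window_size, on which A still returns a value
-- ((len-2w)*2w, the empty-loop fallthrough) that is meaningless for the task.
def Pre_get_num_samples (testo : List Int) (window_size : Int) : Prop :=
  0 ≤ window_size
instance (testo : List Int) (window_size : Int) : Decidable (Pre_get_num_samples testo window_size) := by unfold Pre_get_num_samples; infer_instance

def pvWitness_get_num_samples : List Int × Int := ([1, 2, 3], 2)

def Spec_get_num_samples (testo : List Int) (window_size : Int) (out : Int) : Prop := out = get_num_samples_alt testo window_size
instance (testo : List Int) (window_size : Int) (out : Int) : Decidable (Spec_get_num_samples testo window_size out) := by unfold Spec_get_num_samples; infer_instance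

-- ===== CLAIM =====
def Claim_equal_get_num_samples : Prop := ∀ (testo : List Int) (window_size : Int), Dom_get_num_samples testo window_size → Pre_get_num_samples testo window_size → Spec_get_num_samples testo window_size (get_num_samples testo window_size)

-- ===== LEMMAS AND PROOFS =====
-- The loop of A sums an arithmetic series: sum_{i=0}^{n-1} 2*(2W-(i+1)) = 4Wn - n^2 - n.
lemma loop_sum (W c : Int) (n : Nat) :
    ((PySem.List.pyRange 0 (n : Int) 1).foldl (fun s i => s + (2*((2*W) - (i+1)))) c)
      = c + 4*W*n - n*n - n := by
  induction n generalizing c with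
  | zero => simp
  | succ k ih =>
      have h : ((k : Int) + 1) = ((k + 1 : Nat) : Int) := by push_cast; ring
      rw [show ((k + 1 : Nat) : Int) = (k : Int) + 1 by push_cast; ring,
          PySem.List.pyRange_one_succ_right (by exact_mod_cast Nat.zero_le k),
          List.foldl_append, ih]
      simp only [List.foldl_cons, List.foldl_nil]
      ring

theorem get_num_samples_spec : Claim_equal_get_num_samples := by
  unfold Claim_equal_get_num_samples
  intro testo w _ hpre
  unfold Spec_get_num_samples get_num_samples get_num_samples_alt
  simp only
  split_ifs with h
  · rfl
  · have hw : ((w.toNat : Nat) : Int) = w := Int.toNat_of_nonneg hpre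
    rw [← hw, loop_sum]
    push_cast [hw]
    ring
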